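-- pv_equiv track=rewrite | github.com/stefsmeets/qmk_keymaps | analysis/count.py | gentrigram
-- ===== SOURCE A (Python) =====
-- def gentrigram(iterable):
--     iterator = iter(iterable)
--     a = next(iterator, None)
--     b = next(iterator, None)
--     for c in iterator:
--         yield a, b, c
--         a = b
--         b = c
-- ===== SOURCE B (Python) =====
-- def gentrigram(iterable):
--     xs = list(iterable)
--     return zip(xs, xs[1:], xs[2:])
-- ===== Notes on version B (the rewrite author's own statement) =====
-- stated objective: idiomatic
-- what changed: B materializes the input once and zips three offset slices (xs, xs[1:], xs[2:]) instead of maintaining a two-element sliding window in a generator loop.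
import Mathlib
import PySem

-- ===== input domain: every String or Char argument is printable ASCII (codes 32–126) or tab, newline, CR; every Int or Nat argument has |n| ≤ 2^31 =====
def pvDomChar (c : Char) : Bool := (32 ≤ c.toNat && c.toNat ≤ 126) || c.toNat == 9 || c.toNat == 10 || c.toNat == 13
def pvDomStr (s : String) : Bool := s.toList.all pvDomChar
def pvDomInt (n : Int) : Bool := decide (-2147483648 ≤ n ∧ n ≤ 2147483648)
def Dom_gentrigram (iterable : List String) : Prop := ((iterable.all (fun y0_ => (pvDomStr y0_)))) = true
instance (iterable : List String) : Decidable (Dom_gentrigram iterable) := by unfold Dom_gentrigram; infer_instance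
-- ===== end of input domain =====

-- B replaces A's sliding-window generator with a zip of three offset slices (idiomatic; same O(n) cost).

-- ===== PORT A =====
-- A's for-loop over the remaining iterator, carrying the window (a, b); the
-- initial two next(…, None) calls become the two-element pattern match (if the
-- list has fewer than two elements the loop body never runs and A yields nothing).
def gentrigramLoop (a b : String) : List String → List (String × String × String)
  | [] => []
  | c :: cs => (a, b, c) :: gentrigramLoop b c cs

def gentrigram (iterable : List String) : List (String × String × String) :=
  match iterable with
  | a :: b :: rest => gentrigramLoop a b rest
  | _ => []

-- ===== PORT B =====
-- zip(xs, xs[1:], xs[2:]) — Python's zip truncates to the shortest sequence.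
def gentrigram_alt (iterable : List String) : List (String × String × String) :=
  List.zipWith (fun ab c => (ab.1, ab.2, c))
    (iterable.zip (PySem.List.slice iterable (some 1) none))
    (PySem.List.slice iterable (some 2) none)

-- ===== PRECONDITION & SPEC =====
def Spec_gentrigram (iterable : List String) (out : List (String × String × String)) : Prop := out = gentrigram_alt iterable
instance (iterable : List String) (out : List (String × String × String)) : Decidable (Spec_gentrigram iterable out) := by unfold Spec_gentrigram; infer_instance

-- ===== CLAIM (what is proved, stated in full; the proofs are below) =====
def Claim_equal_gentrigram : Prop := ∀ (iterable : List String), Dom_gentrigram iterable → Spec_gentrigram iterable (gentrigram iterable)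

-- ===== LEMMAS AND PROOFS =====

-- xs[1:], xs[2:] as drops
theorem slice_one (l : List String) : PySem.List.slice l (some 1) none = l.drop 1 :=
  PySem.List.slice_from_natCast l 1

theorem slice_two (l : List String) : PySem.List.slice l (some 2) none = l.drop 2 :=
  PySem.List.slice_from_natCast l 2

theorem gentrigramLoop_eq_alt (cs : List String) : ∀ a b : String,
    gentrigramLoop a b cs = gentrigram_alt (a :: b :: cs) := by
  induction cs with
  | nil => intro a b; simp [gentrigramLoop, gentrigram_alt, slice_one, slice_two]
  | cons c cs ih =>
    intro a b
    have h := ih b c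
    simp only [gentrigram_alt, slice_one, slice_two] at h ⊢
    simp only [gentrigramLoop, List.drop, List.zip, List.zipWith] at h ⊢
    rw [h]

-- ===== VERDICT (by name: the statement is the Claim_ definition above) =====
theorem gentrigram_spec : Claim_equal_gentrigram := by
  intro iterable _
  unfold Spec_gentrigram
  match iterable with
  | [] => decide
  | [a] => simp [gentrigram, gentrigram_alt, slice_one, slice_two]
  | a :: b :: rest => exact (gentrigramLoop_eq_alt rest a b).symm ▸ rfl
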